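-- pv_equiv track=rewrite | github.com/jmthibault79/rosalind | textbook/common.py | middle_edge_half_matrix
-- ===== SOURCE A (Python) =====
-- def init_matrix(rows, cols):
--     matrix = []
--     for row in range(rows):
--         m_row = []
--         for col in range(cols):
--             m_row.append(0)
--         matrix.append(m_row)
--     return matrix
--
-- def max_and_direction(down, right, diag):
--     dir = 'down'
--     max = down
--     if right > max:
--         dir = 'right'
--         max = right
--     if diag > max:
--         dir = 'diag'
--         max = diag
--     return max, dir
--
-- def middle_edge_half_matrix(scoring_matrix, indel_penalty, halfseq1, halfseq2):
--     v = len(halfseq1)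
--     w = len(halfseq2)
--     m = init_matrix(v + 1, w + 1)
--     backtrack_col = { 0: 'right' }
--     for row in range(1, v + 1):
--         m[row][0] = m[row - 1][0] + indel_penalty
--     for col in range(1, w + 1):
--         m[0][col] = m[0][col - 1] + indel_penalty
--         for row in range(1, v + 1):
--             down = m[row - 1][col] + indel_penalty
--             right = m[row][col - 1] + indel_penalty
--             diag = m[row - 1][col - 1] + scoring_matrix[halfseq1[row - 1]][halfseq2[col - 1]]
--
--             best, direction = max_and_direction(down, right, diag)
--             m[row][col] = best
--
--             if col == w:
--                 backtrack_col[row] = direction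
--     return m, backtrack_col
-- ===== SOURCE B (Python) =====
-- def middle_edge_half_matrix(scoring_matrix, indel_penalty, halfseq1, halfseq2):
--     p = indel_penalty
--     v = len(halfseq1)
--     w = len(halfseq2)
--     # wavefront: fill a dict of cells along anti-diagonals i + j = d,
--     # instead of A's in-place column-major matrix fill
--     cells = {}
--     for d in range(v + w + 1):
--         for i in range(max(0, d - w), min(v, d) + 1):
--             j = d - i
--             if i == 0:
--                 cells[(i, j)] = j * p
--             elif j == 0:
--                 cells[(i, j)] = i * p
--             else:
--                 cells[(i, j)] = max(cells[(i - 1, j)] + p, cells[(i, j - 1)] + p,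
--                                     cells[(i - 1, j - 1)] + scoring_matrix[halfseq1[i - 1]][halfseq2[j - 1]])
--     # assemble the row-major matrix from the finished cell dict
--     m = [[cells[(i, j)] for j in range(w + 1)] for i in range(v + 1)]
--     # read the last-column directions off the cell dict
--     backtrack_col = {0: 'right'}
--     if w > 0:
--         for i in range(1, v + 1):
--             down = cells[(i - 1, w)] + p
--             right = cells[(i, w - 1)] + p
--             diag = cells[(i - 1, w - 1)] + scoring_matrix[halfseq1[i - 1]][halfseq2[w - 1]]
--             if diag > max(down, right):
--                 backtrack_col[i] = 'diag'
--             elif right > down: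
--                 backtrack_col[i] = 'right'
--             else:
--                 backtrack_col[i] = 'down'
--     return m, backtrack_col
-- ===== Notes on version B (the rewrite author's own statement) =====
-- stated objective: alternative
-- what changed: A fills the DP matrix in place column-by-column, recording last-column directions inline; B computes the cells in anti-diagonal (wavefront) order into a dict keyed by (i,j), then assembles the row-major matrix from that dict and reads the last-column directions off it in separate passes.
import Mathlib
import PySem

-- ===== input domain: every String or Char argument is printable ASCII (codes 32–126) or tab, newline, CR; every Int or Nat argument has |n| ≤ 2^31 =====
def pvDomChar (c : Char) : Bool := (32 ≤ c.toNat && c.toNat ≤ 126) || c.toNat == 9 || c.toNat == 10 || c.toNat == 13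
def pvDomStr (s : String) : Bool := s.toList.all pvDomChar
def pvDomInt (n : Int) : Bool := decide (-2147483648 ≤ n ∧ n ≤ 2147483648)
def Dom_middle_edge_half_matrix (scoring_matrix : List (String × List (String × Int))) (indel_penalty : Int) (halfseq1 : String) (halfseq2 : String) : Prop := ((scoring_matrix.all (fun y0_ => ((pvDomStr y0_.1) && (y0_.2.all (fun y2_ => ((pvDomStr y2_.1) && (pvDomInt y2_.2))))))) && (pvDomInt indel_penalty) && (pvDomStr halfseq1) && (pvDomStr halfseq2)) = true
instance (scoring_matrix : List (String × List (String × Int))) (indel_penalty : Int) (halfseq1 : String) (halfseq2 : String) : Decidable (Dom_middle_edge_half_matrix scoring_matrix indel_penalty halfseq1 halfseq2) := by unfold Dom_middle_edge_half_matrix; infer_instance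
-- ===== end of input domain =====

-- B replaces A's in-place column-major matrix fill (with inline direction recording) by a
-- wavefront fill of a dict of cells in anti-diagonal order, from which the row-major matrix
-- and the last-column directions are then read off (objective: alternative; equal on Pre_).

-- ===== PORT A =====
def init_matrix (rows cols : Int) : List (List Int) :=
  (PySem.List.pyRange 0 rows 1).foldl
    (fun matrix _ =>
      matrix ++ [(PySem.List.pyRange 0 cols 1).foldl (fun m_row _ => m_row ++ [(0 : Int)]) []])
    []

def max_and_direction (down right diag : Int) : Int × String :=
  let dir := "down"
  let mx := down
  let dm := if right > mx then ("right", right) else (dir, mx)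
  let dm := if diag > dm.2 then ("diag", diag) else dm
  (dm.2, dm.1)

def middle_edge_half_matrix (scoring_matrix : List (String × List (String × Int))) (indel_penalty : Int) (halfseq1 : String) (halfseq2 : String) : List (List Int) × (List (Int × String)) :=
  let v := PySem.Str.len halfseq1
  let w := PySem.Str.len halfseq2
  let m := init_matrix (v + 1) (w + 1)
  let backtrack_col : PySem.Dict Int String := PySem.Dict.ofList [((0 : Int), "right")]
  let m := (PySem.List.pyRange 1 (v + 1) 1).foldl
    (fun m row =>
      PySem.List.pySetD m row
        (PySem.List.pySetD (PySem.List.pyGetD m row []) 0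
          (PySem.List.pyGetD (PySem.List.pyGetD m (row - 1) []) 0 0 + indel_penalty)))
    m
  let st := (PySem.List.pyRange 1 (w + 1) 1).foldl
    (fun st col =>
      let m := st.1
      let backtrack_col := st.2
      let m := PySem.List.pySetD m 0
        (PySem.List.pySetD (PySem.List.pyGetD m 0 []) col
          (PySem.List.pyGetD (PySem.List.pyGetD m 0 []) (col - 1) 0 + indel_penalty))
      (PySem.List.pyRange 1 (v + 1) 1).foldl
        (fun st row =>
          let m := st.1
          let backtrack_col := st.2
          let down := PySem.List.pyGetD (PySem.List.pyGetD m (row - 1) []) col 0 + indel_penalty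
          let right := PySem.List.pyGetD (PySem.List.pyGetD m row []) (col - 1) 0 + indel_penalty
          let diag := PySem.List.pyGetD (PySem.List.pyGetD m (row - 1) []) (col - 1) 0 +
            PySem.Dict.getD
              (PySem.Dict.mk (PySem.Dict.getD (PySem.Dict.mk scoring_matrix)
                (String.singleton ((PySem.Str.pyGet? halfseq1 (row - 1)).getD ' ')) []))
              (String.singleton ((PySem.Str.pyGet? halfseq2 (col - 1)).getD ' ')) 0
          let bd := max_and_direction down right diag
          let m := PySem.List.pySetD m row (PySem.List.pySetD (PySem.List.pyGetD m row []) col bd.1)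
          let backtrack_col := if col == w then backtrack_col.insert row bd.2 else backtrack_col
          (m, backtrack_col))
        (m, backtrack_col))
    (m, backtrack_col)
  (st.1, st.2.items)

-- ===== PORT B =====
def middle_edge_half_matrix_alt (scoring_matrix : List (String × List (String × Int))) (indel_penalty : Int) (halfseq1 : String) (halfseq2 : String) : List (List Int) × (List (Int × String)) :=
  let p := indel_penalty
  let v := PySem.Str.len halfseq1
  let w := PySem.Str.len halfseq2
  let cells : PySem.Dict (Int × Int) Int := PySem.Dict.empty
  let cells := (PySem.List.pyRange 0 (v + w + 1) 1).foldl
    (fun cells d =>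
      (PySem.List.pyRange (max 0 (d - w)) (min v d + 1) 1).foldl
        (fun cells i =>
          let j := d - i
          if i == 0 then cells.insert (i, j) (j * p)
          else if j == 0 then cells.insert (i, j) (i * p)
          else
            cells.insert (i, j)
              (max (max (cells.getD (i - 1, j) 0 + p) (cells.getD (i, j - 1) 0 + p))
                (cells.getD (i - 1, j - 1) 0 +
                  PySem.Dict.getD
                    (PySem.Dict.mk (PySem.Dict.getD (PySem.Dict.mk scoring_matrix)
                      (String.singleton ((PySem.Str.pyGet? halfseq1 (i - 1)).getD ' ')) []))
                    (String.singleton ((PySem.Str.pyGet? halfseq2 (j - 1)).getD ' ')) 0)))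
        cells)
    cells
  -- every cells[(i,j)] below hits a key that is present, so Dict.getD … 0 is exact there
  let m := (PySem.List.pyRange 0 (v + 1) 1).foldl
    (fun rows i =>
      rows ++ [(PySem.List.pyRange 0 (w + 1) 1).foldl
        (fun row j => row ++ [cells.getD (i, j) 0]) []])
    []
  let backtrack_col : PySem.Dict Int String := PySem.Dict.ofList [((0 : Int), "right")]
  let backtrack_col :=
    if w > 0 then
      (PySem.List.pyRange 1 (v + 1) 1).foldl
        (fun bt i =>
          let down := cells.getD (i - 1, w) 0 + p
          let right := cells.getD (i, w - 1) 0 + p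
          let diag := cells.getD (i - 1, w - 1) 0 +
            PySem.Dict.getD
              (PySem.Dict.mk (PySem.Dict.getD (PySem.Dict.mk scoring_matrix)
                (String.singleton ((PySem.Str.pyGet? halfseq1 (i - 1)).getD ' ')) []))
              (String.singleton ((PySem.Str.pyGet? halfseq2 (w - 1)).getD ' ')) 0
          if diag > max down right then bt.insert i "diag"
          else if right > down then bt.insert i "right"
          else bt.insert i "down")
        backtrack_col
    else backtrack_col
  (m, backtrack_col.items)

-- ===== PRECONDITION & SPEC =====
-- Pre_ excludes exactly the inputs on which Python A raises KeyError: some character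
-- of halfseq1 (resp. halfseq2), needed while both strings are nonempty, is missing
-- from the scoring dict (resp. from the matching inner dict).
def Pre_middle_edge_half_matrix (scoring_matrix : List (String × List (String × Int))) (indel_penalty : Int) (halfseq1 : String) (halfseq2 : String) : Prop :=
  (halfseq1.toList.all (fun a => halfseq2.toList.all (fun b =>
    (PySem.Dict.mk scoring_matrix).contains (String.singleton a) &&
    (PySem.Dict.mk ((PySem.Dict.mk scoring_matrix).getD (String.singleton a) [])).contains (String.singleton b)))) = true
instance (scoring_matrix : List (String × List (String × Int))) (indel_penalty : Int) (halfseq1 : String) (halfseq2 : String) : Decidable (Pre_middle_edge_half_matrix scoring_matrix indel_penalty halfseq1 halfseq2) := by unfold Pre_middle_edge_half_matrix; infer_instance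

def pvWitness_middle_edge_half_matrix : (List (String × List (String × Int))) × Int × String × String :=
  ([("A", [("A", 1)])], -1, "A", "A")

def Spec_middle_edge_half_matrix (scoring_matrix : List (String × List (String × Int))) (indel_penalty : Int) (halfseq1 : String) (halfseq2 : String) (out : List (List Int) × (List (Int × String))) : Prop := out = middle_edge_half_matrix_alt scoring_matrix indel_penalty halfseq1 halfseq2
instance (scoring_matrix : List (String × List (String × Int))) (indel_penalty : Int) (halfseq1 : String) (halfseq2 : String) (out : List (List Int) × (List (Int × String))) : Decidable (Spec_middle_edge_half_matrix scoring_matrix indel_penalty halfseq1 halfseq2 out) := by unfold Spec_middle_edge_half_matrix; infer_instance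

-- ===== CLAIM (what is proved, stated in full; the proofs are below) =====
def Claim_equal_middle_edge_half_matrix : Prop := ∀ (scoring_matrix : List (String × List (String × Int))) (indel_penalty : Int) (halfseq1 : String) (halfseq2 : String), Dom_middle_edge_half_matrix scoring_matrix indel_penalty halfseq1 halfseq2 → Pre_middle_edge_half_matrix scoring_matrix indel_penalty halfseq1 halfseq2 → Spec_middle_edge_half_matrix scoring_matrix indel_penalty halfseq1 halfseq2 (middle_edge_half_matrix scoring_matrix indel_penalty halfseq1 halfseq2)

-- ===== LEMMAS AND PROOFS =====

-- generic loop invariants and small list/dict facts used by both port proofs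

theorem pv_foldl_range_inv {α : Type} (f : α → Nat → α) (g : Nat → α) :
    ∀ n : Nat, (∀ t, t < n → f (g t) t = g (t + 1)) →
      (List.range n).foldl f (g 0) = g n := by
  intro n
  induction n with
  | zero => intro _; rfl
  | succ n ih =>
      intro h
      rw [List.range_succ, List.foldl_append]
      rw [ih (fun t ht => h t (by omega))]
      simpa using h n (by omega)

theorem pv_foldl_inv_pred {σ : Type} (step : σ → Nat → σ) (P : Nat → σ → Prop) :
    ∀ (n : Nat) (s : σ), P 0 s → (∀ t s', t < n → P t s' → P (t + 1) (step s' t)) →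
      P n ((List.range n).foldl step s) := by
  intro n
  induction n with
  | zero => intro s h0 _; exact h0
  | succ n ih =>
      intro s h0 h
      rw [List.range_succ, List.foldl_append]
      exact h n _ (by omega) (ih s h0 (fun t s' ht => h t s' (by omega)))

theorem pv_set_map_range {α : Type} (n i : Nat) (g : Nat → α) (x : α) :
    ((List.range n).map g).set i x = (List.range n).map (fun t => if t = i then x else g t) := by
  apply List.ext_getElem
  · simp
  · intro k h1 h2
    simp only [List.getElem_set, List.getElem_map, List.getElem_range]
    by_cases hk : k = i <;> simp [hk, Ne.symm]

theorem pv_map_range_congr {α : Type} (n : Nat) (f g : Nat → α)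
    (h : ∀ t, t < n → f t = g t) : (List.range n).map f = (List.range n).map g := by
  apply List.map_congr_left
  intro t ht
  exact h t (List.mem_range.mp ht)

theorem pv_getD_map_range' {α : Type} (f : Nat → α) (m : Nat) (iI : Int) (i : Nat) (d : α)
    (hiI : iI = (i : Int)) (hi : i < m) :
    PySem.List.pyGetD ((List.range m).map f) iI d = f i := by
  subst hiI
  rw [PySem.List.pyGetD_natCast]
  exact PySem.List.getD_map_range f m i d hi

theorem pv_dict_insert_items {κ : Type} [BEq κ] [LawfulBEq κ] (d : PySem.Dict κ String) (k : κ) (v : String)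
    (h : d.contains k = false) : (d.insert k v).items = d.items ++ [(k, v)] := by
  simpa using PySem.Dict.items_foldl_insert_fresh [()] (fun _ => k) (fun _ => v) d (by simpa) (by simp)

-- the DP recurrence both programs tabulate
def pvCell (p : Int) (sc : Nat → Nat → Int) : Nat → Nat → Int
  | 0, 0 => 0
  | i + 1, 0 => pvCell p sc i 0 + p
  | 0, j + 1 => pvCell p sc 0 j + p
  | i + 1, j + 1 =>
      max (max (pvCell p sc i (j + 1) + p) (pvCell p sc (i + 1) j + p))
        (pvCell p sc i j + sc i j)
termination_by i j => i + j

-- the score both ports look up for matrix cell (i+1, j+1)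
def pvSc (sm : List (String × List (String × Int))) (c1 c2 : List Char) (i j : Nat) : Int :=
  PySem.Dict.getD
    (PySem.Dict.mk (PySem.Dict.getD (PySem.Dict.mk sm) (String.singleton (c1.getD i ' ')) []))
    (String.singleton (c2.getD j ' ')) 0

def pvRow (p : Int) (sc : Nat → Nat → Int) (w i : Nat) : List Int :=
  (List.range (w + 1)).map (fun j => pvCell p sc i j)

def pvTbl (p : Int) (sc : Nat → Nat → Int) (v w : Nat) : List (List Int) :=
  (List.range (v + 1)).map (fun i => pvRow p sc w i)

def pvDir (down right diag : Int) : String :=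
  if diag > max down right then "diag" else if right > down then "right" else "down"

def pvBt (p : Int) (sc : Nat → Nat → Int) (v w : Nat) : List (Int × String) :=
  ((0 : Int), "right") ::
    (if w = 0 then [] else
      (List.range v).map (fun (k : Nat) =>
        (1 + (k : Int),
          pvDir (pvCell p sc k w + p) (pvCell p sc (k + 1) (w - 1) + p)
            (pvCell p sc k (w - 1) + sc k (w - 1)))))

def pvBtItems (p : Int) (sc : Nat → Nat → Int) (w : Nat) (r : Nat) : List (Int × String) :=
  ((0 : Int), "right") ::
    (List.range r).map (fun (k : Nat) =>
      (1 + (k : Int),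
        pvDir (pvCell p sc k w + p) (pvCell p sc (k + 1) (w - 1) + p)
          (pvCell p sc k (w - 1) + sc k (w - 1))))

theorem pvBt_eq_items (p : Int) (sc : Nat → Nat → Int) (v w : Nat) (hw : w ≠ 0) :
    pvBt p sc v w = pvBtItems p sc w v := by
  simp [pvBt, pvBtItems, hw]

-- closed forms of the DP border
theorem pvCell_zero_left (p : Int) (sc : Nat → Nat → Int) (j : Nat) :
    pvCell p sc 0 j = (j : Int) * p := by
  induction j with
  | zero => simp [pvCell]
  | succ j ih => rw [pvCell, ih]; push_cast; ring

theorem pvCell_zero_right (p : Int) (sc : Nat → Nat → Int) (i : Nat) :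
    pvCell p sc i 0 = (i : Int) * p := by
  induction i with
  | zero => simp [pvCell]
  | succ i ih => rw [pvCell, ih]; push_cast; ring

-- A's direction helper, in terms of the tie-break rule B uses
theorem pv_mad_eq (d r g : Int) :
    max_and_direction d r g = (max (max d r) g, pvDir d r g) := by
  unfold max_and_direction pvDir
  dsimp only
  by_cases h1 : d < r
  · rw [if_pos (show r > d from h1), max_eq_right h1.le]
    by_cases h2 : r < g
    · rw [if_pos (show g > ("right", r).2 from h2)]; simp [max_eq_right h2.le, h2]
    · rw [if_neg (show ¬ g > ("right", r).2 from h2)]; simp [max_eq_left (not_lt.mp h2), h2, h1]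
  · rw [if_neg (show ¬ r > d from h1), max_eq_left (not_lt.mp h1)]
    by_cases h2 : d < g
    · rw [if_pos (show g > ("down", d).2 from h2)]; simp [max_eq_right h2.le, h2]
    · rw [if_neg (show ¬ g > ("down", d).2 from h2)]; simp [max_eq_left (not_lt.mp h2), h2, h1]

theorem pv_btItems_fresh (p : Int) (sc : Nat → Nat → Int) (w r : Nat) :
    (PySem.Dict.mk (pvBtItems p sc w r)).contains (1 + (r : Int)) = false := by
  rw [PySem.Dict.contains_mk, List.any_eq_false]
  intro x hx
  simp only [pvBtItems, List.mem_cons, List.mem_map, List.mem_range] at hx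
  rcases hx with h | ⟨k, hk, rfl⟩
  · subst h; simp; omega
  · simp; omega

theorem pv_btDict_insert (p : Int) (sc : Nat → Nat → Int) (w r : Nat) :
    (PySem.Dict.mk (pvBtItems p sc w r)).insert (1 + (r : Int))
        (pvDir (pvCell p sc r w + p) (pvCell p sc (r + 1) (w - 1) + p)
          (pvCell p sc r (w - 1) + sc r (w - 1)))
      = PySem.Dict.mk (pvBtItems p sc w (r + 1)) := by
  apply PySem.Dict.ext
  rw [pv_dict_insert_items _ _ _ (pv_btItems_fresh p sc w r)]
  simp [pvBtItems, List.range_succ]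

-- named copies of A's loop bodies (definitionally equal to the lambdas in the port)
def pvStepCol0 (p : Int) (m : List (List Int)) (row : Int) : List (List Int) :=
  PySem.List.pySetD m row
    (PySem.List.pySetD (PySem.List.pyGetD m row []) 0
      (PySem.List.pyGetD (PySem.List.pyGetD m (row - 1) []) 0 0 + p))

def pvStepCell (sm : List (String × List (String × Int))) (p : Int) (h1 h2 : String)
    (w col : Int) (st : List (List Int) × PySem.Dict Int String) (row : Int) :
    List (List Int) × PySem.Dict Int String :=
  let m := st.1
  let backtrack_col := st.2
  let down := PySem.List.pyGetD (PySem.List.pyGetD m (row - 1) []) col 0 + p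
  let right := PySem.List.pyGetD (PySem.List.pyGetD m row []) (col - 1) 0 + p
  let diag := PySem.List.pyGetD (PySem.List.pyGetD m (row - 1) []) (col - 1) 0 +
    PySem.Dict.getD
      (PySem.Dict.mk (PySem.Dict.getD (PySem.Dict.mk sm)
        (String.singleton ((PySem.Str.pyGet? h1 (row - 1)).getD ' ')) []))
      (String.singleton ((PySem.Str.pyGet? h2 (col - 1)).getD ' ')) 0
  let bd := max_and_direction down right diag
  let m := PySem.List.pySetD m row (PySem.List.pySetD (PySem.List.pyGetD m row []) col bd.1)
  let backtrack_col := if col == w then backtrack_col.insert row bd.2 else backtrack_col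
  (m, backtrack_col)

def pvStepCol (sm : List (String × List (String × Int))) (p : Int) (h1 h2 : String)
    (v w : Int) (st : List (List Int) × PySem.Dict Int String) (col : Int) :
    List (List Int) × PySem.Dict Int String :=
  let m := PySem.List.pySetD st.1 0
    (PySem.List.pySetD (PySem.List.pyGetD st.1 0 []) col
      (PySem.List.pyGetD (PySem.List.pyGetD st.1 0 []) (col - 1) 0 + p))
  (PySem.List.pyRange 1 (v + 1) 1).foldl (pvStepCell sm p h1 h2 w col) (m, st.2)

theorem pvA_unfold (sm : List (String × List (String × Int))) (p : Int) (h1 h2 : String) :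
    middle_edge_half_matrix sm p h1 h2 =
      (let v := PySem.Str.len h1
       let w := PySem.Str.len h2
       let m := init_matrix (v + 1) (w + 1)
       let bt : PySem.Dict Int String := PySem.Dict.ofList [((0 : Int), "right")]
       let m := (PySem.List.pyRange 1 (v + 1) 1).foldl (pvStepCol0 p) m
       let st := (PySem.List.pyRange 1 (w + 1) 1).foldl (pvStepCol sm p h1 h2 v w) (m, bt)
       (st.1, st.2.items)) := rfl

-- matrices as tabulated functions
def pvMatF (v w : Nat) (F : Nat → Nat → Int) : List (List Int) :=
  (List.range (v + 1)).map (fun i => (List.range (w + 1)).map (fun j => F i j))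

theorem pvMatF_congr (v w : Nat) (F G : Nat → Nat → Int)
    (h : ∀ i j, i < v + 1 → j < w + 1 → F i j = G i j) : pvMatF v w F = pvMatF v w G := by
  unfold pvMatF
  apply pv_map_range_congr
  intro i hi
  exact pv_map_range_congr _ _ _ (fun j hj => h i j hi hj)

theorem pv_mat_row (v w : Nat) (F : Nat → Nat → Int) (iI : Int) (i : Nat)
    (hiI : iI = (i : Int)) (hi : i < v + 1) :
    PySem.List.pyGetD (pvMatF v w F) iI [] = (List.range (w + 1)).map (fun j => F i j) :=
  pv_getD_map_range' _ (v + 1) iI i [] hiI hi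

theorem pv_mat_read (v w : Nat) (F : Nat → Nat → Int) (iI : Int) (i : Nat) (jI : Int) (j : Nat)
    (hiI : iI = (i : Int)) (hi : i < v + 1) (hjI : jI = (j : Int)) (hj : j < w + 1) :
    PySem.List.pyGetD (PySem.List.pyGetD (pvMatF v w F) iI []) jI 0 = F i j := by
  rw [pv_mat_row v w F iI i hiI hi]
  exact pv_getD_map_range' _ (w + 1) jI j 0 hjI hj

theorem pv_mat_set (v w : Nat) (F : Nat → Nat → Int) (iI : Int) (i : Nat) (jI : Int) (j : Nat)
    (x : Int) (hiI : iI = (i : Int)) (hi : i < v + 1) (hjI : jI = (j : Int)) (_hj : j < w + 1) :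
    PySem.List.pySetD (pvMatF v w F) iI
        (PySem.List.pySetD (PySem.List.pyGetD (pvMatF v w F) iI []) jI x)
      = pvMatF v w (fun i' j' => if i' = i ∧ j' = j then x else F i' j') := by
  rw [pv_mat_row v w F iI i hiI hi]
  subst hiI hjI
  rw [PySem.List.pySetD_natCast, PySem.List.pySetD_natCast]
  unfold pvMatF
  rw [pv_set_map_range (w + 1) j _ x, pv_set_map_range (v + 1) i _ _]
  apply pv_map_range_congr
  intro i' hi'
  by_cases hii : i' = i
  · subst hii
    rw [if_pos rfl]
    apply pv_map_range_congr
    intro j' hj'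
    by_cases hjj : j' = j <;> simp [hjj]
  · simp only [if_neg hii]
    apply pv_map_range_congr
    intro j' hj'
    simp [hii]

-- A's init_matrix builds the zero table
theorem pv_foldl_append_const {α β : Type} (x : α) :
    ∀ (l : List β) (init : List α),
      l.foldl (fun acc _ => acc ++ [x]) init = init ++ List.replicate l.length x := by
  intro l
  induction l with
  | nil => intro init; simp
  | cons y ys ih =>
      intro init
      rw [List.foldl_cons, ih, List.append_assoc]
      simp [List.replicate_succ]

theorem pvA_init (_p : Int) (V W : Nat) :
    init_matrix ((V : Int) + 1) ((W : Int) + 1) = pvMatF V W (fun _ _ => 0) := by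
  unfold init_matrix
  rw [pv_foldl_append_const, pv_foldl_append_const]
  simp only [List.nil_append, PySem.List.length_pyRange_one]
  rw [show (((V : Int) + 1) - 0).toNat = V + 1 by omega,
      show (((W : Int) + 1) - 0).toNat = W + 1 by omega]
  unfold pvMatF
  simp [List.map_const']

-- the backtrack dict A carries: {0:'right'} until the last column has been processed
def pvBA (p : Int) (sc : Nat → Nat → Int) (v w t : Nat) : PySem.Dict Int String :=
  if 1 ≤ t ∧ t = w then PySem.Dict.mk (pvBtItems p sc w v)
  else PySem.Dict.mk [((0 : Int), "right")]

theorem pvA_col0 (p : Int) (V W : Nat) :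
    (List.range V).foldl (fun m (k : Nat) => pvStepCol0 p m (1 + (k : Int)))
        (pvMatF V W (fun _ _ => 0))
      = pvMatF V W (fun i j => if j = 0 then (i : Int) * p else 0) := by
  have h0 : pvMatF V W (fun i j => if j = 0 ∧ i ≤ 0 then (i : Int) * p else 0)
      = pvMatF V W (fun _ _ => 0) := by
    apply pvMatF_congr
    intro i j _ _
    split_ifs with h
    · have : i = 0 := by omega
      subst this; simp
    · rfl
  rw [← h0]
  rw [pv_foldl_range_inv (fun m (k : Nat) => pvStepCol0 p m (1 + (k : Int)))
    (fun r => pvMatF V W (fun i j => if j = 0 ∧ i ≤ r then (i : Int) * p else 0)) V ?_]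
  · apply pvMatF_congr
    intro i j hi hj
    split_ifs <;> first | rfl | omega
  · intro r hr
    dsimp only
    unfold pvStepCol0
    rw [show (1 + (r : Int)) - 1 = ((r : Nat) : Int) by omega]
    rw [pv_mat_read V W _ ((r : Nat) : Int) r 0 0 rfl (by omega) rfl (by omega)]
    rw [if_pos (show (0 : Nat) = 0 ∧ r ≤ r by omega)]
    rw [pv_mat_set V W _ (1 + (r : Int)) (r + 1) 0 0 _ (by omega) (by omega) rfl (by omega)]
    apply pvMatF_congr
    intro i j hi hj
    by_cases h : i = r + 1 ∧ j = 0
    · obtain ⟨rfl, rfl⟩ := h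
      rw [if_pos ⟨rfl, rfl⟩, if_pos (by omega : (0 : Nat) = 0 ∧ r + 1 ≤ r + 1)]
      push_cast; ring
    · rw [if_neg h]
      split_ifs <;> first | rfl | omega

theorem pvA_cell_step (sm : List (String × List (String × Int))) (p : Int) (h1 h2 : String)
    (t r : Nat) (ht : t < h2.toList.length) (hr : r < h1.toList.length) :
    pvStepCell sm p h1 h2 ((h2.toList.length : Int)) (1 + (t : Int))
      (pvMatF h1.toList.length h2.toList.length
         (fun i j => if j ≤ t ∨ (j = t + 1 ∧ i ≤ r)
           then pvCell p (pvSc sm h1.toList h2.toList) i j else 0),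
       if t + 1 = h2.toList.length
       then PySem.Dict.mk (pvBtItems p (pvSc sm h1.toList h2.toList) h2.toList.length r)
       else PySem.Dict.mk [((0 : Int), "right")])
      (1 + (r : Int))
      = (pvMatF h1.toList.length h2.toList.length
           (fun i j => if j ≤ t ∨ (j = t + 1 ∧ i ≤ r + 1)
             then pvCell p (pvSc sm h1.toList h2.toList) i j else 0),
         if t + 1 = h2.toList.length
         then PySem.Dict.mk (pvBtItems p (pvSc sm h1.toList h2.toList) h2.toList.length (r + 1))
         else PySem.Dict.mk [((0 : Int), "right")]) := by
  unfold pvStepCell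
  dsimp only
  rw [show (1 + (r : Int)) - 1 = ((r : Nat) : Int) by omega]
  rw [show (1 + (t : Int)) - 1 = ((t : Nat) : Int) by omega]
  rw [pv_mat_read _ _ _ ((r : Nat) : Int) r (1 + (t : Int)) (t + 1) rfl (by omega) (by omega) (by omega)]
  rw [pv_mat_read _ _ _ (1 + (r : Int)) (r + 1) ((t : Nat) : Int) t (by omega) (by omega) rfl (by omega)]
  rw [pv_mat_read _ _ _ ((r : Nat) : Int) r ((t : Nat) : Int) t rfl (by omega) rfl (by omega)]
  rw [if_pos (show t + 1 ≤ t ∨ (t + 1 = t + 1 ∧ r ≤ r) by omega)]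
  rw [if_pos (show t ≤ t ∨ (t = t + 1 ∧ r + 1 ≤ r) by omega)]
  rw [if_pos (show t ≤ t ∨ (t = t + 1 ∧ r ≤ r) by omega)]
  rw [PySem.Str.pyGet?_natCast h1 r, PySem.Str.pyGet?_natCast h2 t]
  rw [← List.getD_eq_getElem?_getD, ← List.getD_eq_getElem?_getD]
  rw [show PySem.Dict.getD
        (PySem.Dict.mk (PySem.Dict.getD (PySem.Dict.mk sm)
          (String.singleton (h1.toList.getD r ' ')) []))
        (String.singleton (h2.toList.getD t ' ')) 0
      = pvSc sm h1.toList h2.toList r t from rfl]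
  rw [pv_mad_eq]
  dsimp only
  have hbest : max (max (pvCell p (pvSc sm h1.toList h2.toList) r (t + 1) + p)
        (pvCell p (pvSc sm h1.toList h2.toList) (r + 1) t + p))
      (pvCell p (pvSc sm h1.toList h2.toList) r t + pvSc sm h1.toList h2.toList r t)
      = pvCell p (pvSc sm h1.toList h2.toList) (r + 1) (t + 1) := by
    rw [pvCell]
  rw [hbest]
  rw [pv_mat_set _ _ _ (1 + (r : Int)) (r + 1) (1 + (t : Int)) (t + 1) _ (by omega) (by omega) (by omega) (by omega)]
  congr 1
  · apply pvMatF_congr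
    intro i j hi hj
    by_cases h : i = r + 1 ∧ j = t + 1
    · obtain ⟨rfl, rfl⟩ := h
      rw [if_pos ⟨rfl, rfl⟩, if_pos (by omega : t + 1 ≤ t ∨ (t + 1 = t + 1 ∧ r + 1 ≤ r + 1))]
    · rw [if_neg h]
      split_ifs <;> first | rfl | omega
  · by_cases hW : t + 1 = h2.toList.length
    · have hbeq : ((1 + (t : Int)) == ((h2.toList.length : Int))) = true := by
        simp only [beq_iff_eq]; omega
      rw [if_pos hW, if_pos hW, if_pos hbeq]
      rw [← hW]
      have := pv_btDict_insert p (pvSc sm h1.toList h2.toList) (t + 1) r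
      simpa using this
    · have hbeq : ¬ (((1 + (t : Int)) == ((h2.toList.length : Int))) = true) := by
        simp only [beq_iff_eq]; omega
      rw [if_neg hW, if_neg hW, if_neg hbeq]

theorem pvA_col_step (sm : List (String × List (String × Int))) (p : Int) (h1 h2 : String)
    (t : Nat) (ht : t < h2.toList.length) :
    pvStepCol sm p h1 h2 ((h1.toList.length : Int)) ((h2.toList.length : Int))
      (pvMatF h1.toList.length h2.toList.length
         (fun i j => if j ≤ t then pvCell p (pvSc sm h1.toList h2.toList) i j else 0),
       pvBA p (pvSc sm h1.toList h2.toList) h1.toList.length h2.toList.length t)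
      (1 + (t : Int))
      = (pvMatF h1.toList.length h2.toList.length
           (fun i j => if j ≤ t + 1 then pvCell p (pvSc sm h1.toList h2.toList) i j else 0),
         pvBA p (pvSc sm h1.toList h2.toList) h1.toList.length h2.toList.length (t + 1)) := by
  unfold pvStepCol
  dsimp only
  rw [show (1 + (t : Int)) - 1 = ((t : Nat) : Int) by omega]
  rw [pv_mat_read _ _ _ (0 : Int) 0 ((t : Nat) : Int) t rfl (by omega) rfl (by omega)]
  rw [if_pos (le_refl t)]
  have hx : pvCell p (pvSc sm h1.toList h2.toList) 0 t + p
      = pvCell p (pvSc sm h1.toList h2.toList) 0 (t + 1) := by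
    rw [pvCell]
  rw [hx]
  rw [pv_mat_set _ _ _ (0 : Int) 0 (1 + (t : Int)) (t + 1) _ rfl (by omega) (by omega) (by omega)]
  have hinit : pvMatF h1.toList.length h2.toList.length
      (fun i' j' => if i' = 0 ∧ j' = t + 1
        then pvCell p (pvSc sm h1.toList h2.toList) 0 (t + 1)
        else if j' ≤ t then pvCell p (pvSc sm h1.toList h2.toList) i' j' else 0)
      = pvMatF h1.toList.length h2.toList.length
        (fun i j => if j ≤ t ∨ (j = t + 1 ∧ i ≤ 0)
          then pvCell p (pvSc sm h1.toList h2.toList) i j else 0) := by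
    apply pvMatF_congr
    intro i j hi hj
    by_cases h : i = 0 ∧ j = t + 1
    · obtain ⟨rfl, rfl⟩ := h
      rw [if_pos ⟨rfl, rfl⟩, if_pos (by omega : t + 1 ≤ t ∨ (t + 1 = t + 1 ∧ (0 : Nat) ≤ 0))]
    · rw [if_neg h]
      split_ifs <;> first | rfl | omega
  rw [hinit]
  have hbt0 : pvBA p (pvSc sm h1.toList h2.toList) h1.toList.length h2.toList.length t
      = (if t + 1 = h2.toList.length
         then PySem.Dict.mk (pvBtItems p (pvSc sm h1.toList h2.toList) h2.toList.length 0)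
         else PySem.Dict.mk [((0 : Int), "right")]) := by
    unfold pvBA
    rw [if_neg (by omega)]
    split_ifs <;> simp [pvBtItems]
  rw [hbt0]
  rw [show ((h1.toList.length : Int) + 1) = ((h1.toList.length + 1 : Nat) : Int) by omega]
  rw [PySem.List.pyRange_one]
  rw [show ((((h1.toList.length + 1 : Nat)) : Int) - 1).toNat = h1.toList.length by omega]
  rw [List.foldl_map]
  have hfold := pv_foldl_range_inv
    (fun st (k : Nat) => pvStepCell sm p h1 h2 ((h2.toList.length : Int)) (1 + (t : Int)) st (1 + (k : Int)))
    (fun r => (pvMatF h1.toList.length h2.toList.length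
        (fun i j => if j ≤ t ∨ (j = t + 1 ∧ i ≤ r)
          then pvCell p (pvSc sm h1.toList h2.toList) i j else 0),
      if t + 1 = h2.toList.length
      then PySem.Dict.mk (pvBtItems p (pvSc sm h1.toList h2.toList) h2.toList.length r)
      else PySem.Dict.mk [((0 : Int), "right")]))
    h1.toList.length
    (fun r hr => pvA_cell_step sm p h1 h2 t r ht hr)
  rw [hfold]
  dsimp only
  congr 1
  · apply pvMatF_congr
    intro i j hi hj
    split_ifs <;> first | rfl | omega
  · unfold pvBA
    by_cases hW : t + 1 = h2.toList.length
    · rw [if_pos hW, if_pos (by omega)]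
    · rw [if_neg hW, if_neg (by omega)]

theorem pvA_eq (sm : List (String × List (String × Int))) (p : Int) (h1 h2 : String) :
    middle_edge_half_matrix sm p h1 h2 =
      (pvTbl p (pvSc sm h1.toList h2.toList) h1.toList.length h2.toList.length,
       pvBt p (pvSc sm h1.toList h2.toList) h1.toList.length h2.toList.length) := by
  rw [pvA_unfold]
  dsimp only
  rw [PySem.Str.len_eq, PySem.Str.len_eq]
  rw [pvA_init p h1.toList.length h2.toList.length]
  rw [show ((h1.toList.length : Int) + 1) = ((h1.toList.length + 1 : Nat) : Int) by omega]
  rw [PySem.List.pyRange_one 1 (((h1.toList.length + 1 : Nat)) : Int)]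
  rw [show ((((h1.toList.length + 1 : Nat)) : Int) - 1).toNat = h1.toList.length by omega]
  rw [List.foldl_map]
  rw [pvA_col0 p h1.toList.length h2.toList.length]
  have hA0 : pvMatF h1.toList.length h2.toList.length (fun i j => if j = 0 then (i : Int) * p else 0)
      = pvMatF h1.toList.length h2.toList.length
          (fun i j => if j ≤ 0 then pvCell p (pvSc sm h1.toList h2.toList) i j else 0) := by
    apply pvMatF_congr
    intro i j hi hj
    by_cases hj0 : j = 0
    · subst hj0
      rw [if_pos rfl, if_pos (le_refl 0), pvCell_zero_right]
    · rw [if_neg hj0, if_neg (by omega)]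
  rw [hA0]
  rw [show ((h2.toList.length : Int) + 1) = ((h2.toList.length + 1 : Nat) : Int) by omega]
  rw [PySem.List.pyRange_one 1 (((h2.toList.length + 1 : Nat)) : Int)]
  rw [show ((((h2.toList.length + 1 : Nat)) : Int) - 1).toNat = h2.toList.length by omega]
  rw [List.foldl_map]
  rw [show ((PySem.Dict.ofList [((0 : Int), "right")]) : PySem.Dict Int String)
        = pvBA p (pvSc sm h1.toList h2.toList) h1.toList.length h2.toList.length 0 from by
      unfold pvBA
      rw [if_neg (by omega)]
      rfl]
  have hfold := pv_foldl_range_inv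
    (fun st (k : Nat) => pvStepCol sm p h1 h2 ((h1.toList.length : Int)) ((h2.toList.length : Int)) st (1 + (k : Int)))
    (fun t => (pvMatF h1.toList.length h2.toList.length
        (fun i j => if j ≤ t then pvCell p (pvSc sm h1.toList h2.toList) i j else 0),
      pvBA p (pvSc sm h1.toList h2.toList) h1.toList.length h2.toList.length t))
    h2.toList.length
    (fun t htt => pvA_col_step sm p h1 h2 t htt)
  rw [hfold]
  dsimp only
  congr 1
  · rw [show pvTbl p (pvSc sm h1.toList h2.toList) h1.toList.length h2.toList.length
        = pvMatF h1.toList.length h2.toList.length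
            (fun i j => pvCell p (pvSc sm h1.toList h2.toList) i j) from rfl]
    apply pvMatF_congr
    intro i j hi hj
    rw [if_pos (by omega)]
  · unfold pvBA
    by_cases hW : h2.toList.length = 0
    · rw [if_neg (by omega)]
      simp [pvBt, hW]
    · rw [if_pos (by omega)]
      rw [pvBt_eq_items p (pvSc sm h1.toList h2.toList) h1.toList.length h2.toList.length hW]

-- ===== B-side proofs: the wavefront dict fill =====

-- named copies of B's loop bodies (definitionally equal to the lambdas in the port)
def pvStepI (sm : List (String × List (String × Int))) (p : Int) (h1 h2 : String)
    (d : Int) (cells : PySem.Dict (Int × Int) Int) (i : Int) : PySem.Dict (Int × Int) Int :=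
  let j := d - i
  if i == 0 then cells.insert (i, j) (j * p)
  else if j == 0 then cells.insert (i, j) (i * p)
  else
    cells.insert (i, j)
      (max (max (cells.getD (i - 1, j) 0 + p) (cells.getD (i, j - 1) 0 + p))
        (cells.getD (i - 1, j - 1) 0 +
          PySem.Dict.getD
            (PySem.Dict.mk (PySem.Dict.getD (PySem.Dict.mk sm)
              (String.singleton ((PySem.Str.pyGet? h1 (i - 1)).getD ' ')) []))
            (String.singleton ((PySem.Str.pyGet? h2 (j - 1)).getD ' ')) 0))

def pvStepD (sm : List (String × List (String × Int))) (p : Int) (h1 h2 : String)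
    (v w : Int) (cells : PySem.Dict (Int × Int) Int) (d : Int) : PySem.Dict (Int × Int) Int :=
  (PySem.List.pyRange (max 0 (d - w)) (min v d + 1) 1).foldl (pvStepI sm p h1 h2 d) cells

def pvStepBt2 (sm : List (String × List (String × Int))) (p : Int) (h1 h2 : String)
    (w : Int) (cells : PySem.Dict (Int × Int) Int) (bt : PySem.Dict Int String) (i : Int) :
    PySem.Dict Int String :=
  let down := cells.getD (i - 1, w) 0 + p
  let right := cells.getD (i, w - 1) 0 + p
  let diag := cells.getD (i - 1, w - 1) 0 +
    PySem.Dict.getD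
      (PySem.Dict.mk (PySem.Dict.getD (PySem.Dict.mk sm)
        (String.singleton ((PySem.Str.pyGet? h1 (i - 1)).getD ' ')) []))
      (String.singleton ((PySem.Str.pyGet? h2 (w - 1)).getD ' ')) 0
  if diag > max down right then bt.insert i "diag"
  else if right > down then bt.insert i "right"
  else bt.insert i "down"

def pvCellsB (sm : List (String × List (String × Int))) (p : Int) (h1 h2 : String) :
    PySem.Dict (Int × Int) Int :=
  (PySem.List.pyRange 0 (PySem.Str.len h1 + PySem.Str.len h2 + 1) 1).foldl
    (pvStepD sm p h1 h2 (PySem.Str.len h1) (PySem.Str.len h2)) PySem.Dict.empty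

theorem pvB_unfold (sm : List (String × List (String × Int))) (p : Int) (h1 h2 : String) :
    middle_edge_half_matrix_alt sm p h1 h2 =
      (let v := PySem.Str.len h1
       let w := PySem.Str.len h2
       let cells := pvCellsB sm p h1 h2
       let m := (PySem.List.pyRange 0 (v + 1) 1).foldl
         (fun rows i =>
           rows ++ [(PySem.List.pyRange 0 (w + 1) 1).foldl
             (fun row j => row ++ [cells.getD (i, j) 0]) []]) []
       let bt : PySem.Dict Int String := PySem.Dict.mk [((0 : Int), "right")]
       let bt := if w > 0 then
           (PySem.List.pyRange 1 (v + 1) 1).foldl (pvStepBt2 sm p h1 h2 w cells) bt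
         else bt
       (m, bt.items)) := rfl

-- the dict invariant: every cell of the processed region is stored with its DP value
def pvCellsInv (p : Int) (sc : Nat → Nat → Int) (V W : Nat) (C : Nat → Nat → Prop)
    (cells : PySem.Dict (Int × Int) Int) : Prop :=
  ∀ a b : Nat, a ≤ V → b ≤ W → C a b →
    cells.get? (((a : Nat) : Int), ((b : Nat) : Int)) = some (pvCell p sc a b)

theorem pvCellsInv_mono (p : Int) (sc : Nat → Nat → Int) (V W : Nat)
    (C C' : Nat → Nat → Prop) (cells : PySem.Dict (Int × Int) Int)
    (h : pvCellsInv p sc V W C cells)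
    (himp : ∀ a b, a ≤ V → b ≤ W → C' a b → C a b) : pvCellsInv p sc V W C' cells :=
  fun a b ha hb hc => h a b ha hb (himp a b ha hb hc)

theorem pvCellsInv_insert (p : Int) (sc : Nat → Nat → Int) (V W : Nat)
    (C : Nat → Nat → Prop) (cells : PySem.Dict (Int × Int) Int)
    (h : pvCellsInv p sc V W C cells) (a0 b0 : Nat) (x : Int) (hx : x = pvCell p sc a0 b0) :
    pvCellsInv p sc V W (fun a b => C a b ∨ (a = a0 ∧ b = b0))
      (cells.insert (((a0 : Nat) : Int), ((b0 : Nat) : Int)) x) := by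
  intro a b ha hb hc
  rw [PySem.Dict.get?_insert]
  by_cases he : (((a : Nat) : Int), ((b : Nat) : Int)) = (((a0 : Nat) : Int), ((b0 : Nat) : Int))
  · simp only [Prod.mk.injEq] at he
    have ha0 : a = a0 := by exact_mod_cast he.1
    have hb0 : b = b0 := by exact_mod_cast he.2
    rw [if_pos (by simp [he.1, he.2]), hx, ha0, hb0]
  · rw [if_neg he]
    apply h a b ha hb
    rcases hc with h1 | ⟨rfl, rfl⟩
    · exact h1
    · exact absurd rfl he

theorem pv_cells_read (p : Int) (sc : Nat → Nat → Int) (V W : Nat)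
    (C : Nat → Nat → Prop) (cells : PySem.Dict (Int × Int) Int)
    (h : pvCellsInv p sc V W C cells) (aI bI : Int) (a b : Nat)
    (haI : aI = (a : Int)) (hbI : bI = (b : Int))
    (ha : a ≤ V) (hb : b ≤ W) (hc : C a b) :
    cells.getD (aI, bI) 0 = pvCell p sc a b := by
  subst haI hbI
  apply PySem.Dict.getD_of_get?_eq_some
  exact h a b ha hb hc

theorem pvB_inner_step (sm : List (String × List (String × Int))) (p : Int) (h1 h2 : String)
    (d k : Nat) (hd : d < h1.toList.length + h2.toList.length + 1)
    (hk : k < min h1.toList.length d + 1 - (d - h2.toList.length))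
    (cells : PySem.Dict (Int × Int) Int)
    (h : pvCellsInv p (pvSc sm h1.toList h2.toList) h1.toList.length h2.toList.length
      (fun a b => a + b < d ∨ (a + b = d ∧ a < d - h2.toList.length + k)) cells) :
    pvCellsInv p (pvSc sm h1.toList h2.toList) h1.toList.length h2.toList.length
      (fun a b => a + b < d ∨ (a + b = d ∧ a < d - h2.toList.length + (k + 1)))
      (pvStepI sm p h1 h2 ((d : Nat) : Int) cells (((d - h2.toList.length : Nat) : Int) + ((k : Nat) : Int))) := by
  set V := h1.toList.length with hV
  set W := h2.toList.length with hW
  set sc := pvSc sm h1.toList h2.toList with hsc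
  set A := d - W + k with hA
  have hAle : A ≤ min V d := by omega
  have hAV : A ≤ V := by omega
  have hAd : A ≤ d := by omega
  set B := d - A with hB
  have hBW : B ≤ W := by omega
  have hiA : ((d - W : Nat) : Int) + ((k : Nat) : Int) = ((A : Nat) : Int) := by
    push_cast [hA]; ring
  unfold pvStepI
  rw [hiA]
  have hj : ((d : Nat) : Int) - ((A : Nat) : Int) = ((B : Nat) : Int) := by omega
  dsimp only
  rw [hj]
  by_cases hA0 : A = 0
  · rw [if_pos (by simp [hA0])]
    have hx : ((B : Nat) : Int) * p = pvCell p sc A B := by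
      rw [hA0]; exact (pvCell_zero_left p sc B).symm
    have hins := pvCellsInv_insert p sc V W _ cells h A B _ hx
    apply pvCellsInv_mono p sc V W _ _ _ hins
    intro a b ha hb hc
    rcases hc with h1 | ⟨h1, h2'⟩
    · exact Or.inl (Or.inl h1)
    · by_cases hcur : a = A ∧ b = B
      · exact Or.inr hcur
      · exact Or.inl (Or.inr ⟨h1, by omega⟩)
  · rw [if_neg (by simp; omega)]
    by_cases hB0 : B = 0
    · rw [if_pos (by simp [hB0])]
      have hx : ((A : Nat) : Int) * p = pvCell p sc A B := by
        rw [hB0]; exact (pvCell_zero_right p sc A).symm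
      have hins := pvCellsInv_insert p sc V W _ cells h A B _ hx
      apply pvCellsInv_mono p sc V W _ _ _ hins
      intro a b ha hb hc
      rcases hc with h1 | ⟨h1, h2'⟩
      · exact Or.inl (Or.inl h1)
      · by_cases hcur : a = A ∧ b = B
        · exact Or.inr hcur
        · exact Or.inl (Or.inr ⟨h1, by omega⟩)
    · rw [if_neg (by simp; omega)]
      have hd2 : 2 ≤ d := by omega
      have e1 : ((A : Nat) : Int) - 1 = ((A - 1 : Nat) : Int) := by omega
      have e2 : ((B : Nat) : Int) - 1 = ((B - 1 : Nat) : Int) := by omega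
      rw [e1, e2]
      rw [pv_cells_read p sc V W _ cells h _ _ (A - 1) B rfl rfl (by omega) hBW (by left; omega)]
      rw [pv_cells_read p sc V W _ cells h _ _ A (B - 1) rfl rfl hAV (by omega) (by left; omega)]
      rw [pv_cells_read p sc V W _ cells h _ _ (A - 1) (B - 1) rfl rfl (by omega) (by omega) (by left; omega)]
      rw [PySem.Str.pyGet?_natCast h1 (A - 1), PySem.Str.pyGet?_natCast h2 (B - 1)]
      rw [← List.getD_eq_getElem?_getD, ← List.getD_eq_getElem?_getD]
      have hval : max (max (pvCell p sc (A - 1) B + p) (pvCell p sc A (B - 1) + p))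
          (pvCell p sc (A - 1) (B - 1) +
            PySem.Dict.getD
              (PySem.Dict.mk (PySem.Dict.getD (PySem.Dict.mk sm)
                (String.singleton (h1.toList.getD (A - 1) ' ')) []))
              (String.singleton (h2.toList.getD (B - 1) ' ')) 0)
          = pvCell p sc A B := by
        obtain ⟨A', hA'⟩ : ∃ A', A = A' + 1 := ⟨A - 1, by omega⟩
        obtain ⟨B', hB'⟩ : ∃ B', B = B' + 1 := ⟨B - 1, by omega⟩
        rw [hA', hB']
        simp only [Nat.add_sub_cancel]
        rw [pvCell]
        rfl
      have hins := pvCellsInv_insert p sc V W _ cells h A B _ hval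
      apply pvCellsInv_mono p sc V W _ _ _ hins
      intro a b ha hb hc
      rcases hc with h1 | ⟨h1, h2'⟩
      · exact Or.inl (Or.inl h1)
      · by_cases hcur : a = A ∧ b = B
        · exact Or.inr hcur
        · exact Or.inl (Or.inr ⟨h1, by omega⟩)

theorem pvB_outer_step (sm : List (String × List (String × Int))) (p : Int) (h1 h2 : String)
    (d : Nat) (hd : d < h1.toList.length + h2.toList.length + 1)
    (cells : PySem.Dict (Int × Int) Int)
    (h : pvCellsInv p (pvSc sm h1.toList h2.toList) h1.toList.length h2.toList.length
      (fun a b => a + b < d) cells) :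
    pvCellsInv p (pvSc sm h1.toList h2.toList) h1.toList.length h2.toList.length
      (fun a b => a + b < d + 1)
      (pvStepD sm p h1 h2 ((h1.toList.length : Int)) ((h2.toList.length : Int)) cells ((d : Nat) : Int)) := by
  set V := h1.toList.length with hV
  set W := h2.toList.length with hW
  set sc := pvSc sm h1.toList h2.toList with hsc
  unfold pvStepD
  rw [show max 0 (((d : Nat) : Int) - ((W : Nat) : Int)) = ((d - W : Nat) : Int) by omega]
  rw [PySem.List.pyRange_one]
  rw [show ((min ((V : Nat) : Int) ((d : Nat) : Int) + 1) - ((d - W : Nat) : Int)).toNat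
      = min V d + 1 - (d - W) by omega]
  rw [List.foldl_map]
  set cnt := min V d + 1 - (d - W) with hcnt
  have hfold := pv_foldl_inv_pred
    (fun cells (k : Nat) => pvStepI sm p h1 h2 ((d : Nat) : Int) cells (((d - W : Nat) : Int) + ((k : Nat) : Int)))
    (fun k cells => pvCellsInv p sc V W
      (fun a b => a + b < d ∨ (a + b = d ∧ a < d - W + k)) cells)
    cnt cells
    (pvCellsInv_mono p sc V W _ _ _ h (by intro a b ha hb hc; omega))
    (fun t s' ht hs => pvB_inner_step sm p h1 h2 d t hd (by omega) s' hs)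
  apply pvCellsInv_mono p sc V W _ _ _ hfold
  intro a b ha hb hc
  by_cases h1 : a + b < d
  · exact Or.inl h1
  · right
    constructor
    · omega
    · omega

theorem pvB_cells (sm : List (String × List (String × Int))) (p : Int) (h1 h2 : String)
    (a b : Nat) (ha : a ≤ h1.toList.length) (hb : b ≤ h2.toList.length)
    (aI bI : Int) (haI : aI = (a : Int)) (hbI : bI = (b : Int)) :
    (pvCellsB sm p h1 h2).getD (aI, bI) 0 = pvCell p (pvSc sm h1.toList h2.toList) a b := by
  set V := h1.toList.length with hV
  set W := h2.toList.length with hW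
  have hInv : pvCellsInv p (pvSc sm h1.toList h2.toList) V W
      (fun a b => a + b < V + W + 1) (pvCellsB sm p h1 h2) := by
    unfold pvCellsB
    rw [PySem.Str.len_eq, PySem.Str.len_eq]
    rw [show ((V : Int) + (W : Int) + 1) = ((V + W + 1 : Nat) : Int) by push_cast; ring]
    rw [PySem.List.pyRange_zero_nat]
    rw [List.foldl_map]
    exact pv_foldl_inv_pred
      (fun cells (k : Nat) => pvStepD sm p h1 h2 ((V : Int)) ((W : Int)) cells ((k : Nat) : Int))
      (fun d cells => pvCellsInv p (pvSc sm h1.toList h2.toList) V W (fun a b => a + b < d) cells)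
      (V + W + 1) PySem.Dict.empty
      (by intro a b _ _ hc; omega)
      (fun t s' ht hs => pvB_outer_step sm p h1 h2 t ht s' hs)
  exact pv_cells_read p (pvSc sm h1.toList h2.toList) V W _ _ hInv aI bI a b haI hbI ha hb (by omega)

theorem pvB_bt_step (sm : List (String × List (String × Int))) (p : Int) (h1 h2 : String)
    (r : Nat) (hr : r < h1.toList.length) (hW : h2.toList.length ≠ 0) :
    pvStepBt2 sm p h1 h2 ((h2.toList.length : Int)) (pvCellsB sm p h1 h2)
        (PySem.Dict.mk (pvBtItems p (pvSc sm h1.toList h2.toList) h2.toList.length r))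
        (1 + (r : Int))
      = PySem.Dict.mk (pvBtItems p (pvSc sm h1.toList h2.toList) h2.toList.length (r + 1)) := by
  set W := h2.toList.length with hWd
  set sc := pvSc sm h1.toList h2.toList with hsc
  unfold pvStepBt2
  have e1 : (1 + (r : Int)) - 1 = ((r : Nat) : Int) := by omega
  have e3 : ((W : Int)) - 1 = (((W - 1 : Nat)) : Int) := by omega
  rw [e1, e3]
  dsimp only
  rw [pvB_cells sm p h1 h2 r W (by omega) (by omega) _ _ rfl rfl]
  rw [pvB_cells sm p h1 h2 (r + 1) (W - 1) (by omega) (by omega) (1 + (r : Int)) (((W - 1 : Nat)) : Int) (by omega) rfl]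
  rw [pvB_cells sm p h1 h2 r (W - 1) (by omega) (by omega) _ _ rfl rfl]
  rw [PySem.Str.pyGet?_natCast h1 r, PySem.Str.pyGet?_natCast h2 (W - 1)]
  rw [← List.getD_eq_getElem?_getD, ← List.getD_eq_getElem?_getD]
  have hdict : PySem.Dict.getD
      (PySem.Dict.mk (PySem.Dict.getD (PySem.Dict.mk sm)
        (String.singleton (h1.toList.getD r ' ')) []))
      (String.singleton (h2.toList.getD (W - 1) ' ')) 0
      = sc r (W - 1) := rfl
  rw [hdict]
  set d := pvCell p sc r W + p with hd
  set rr := pvCell p sc (r + 1) (W - 1) + p with hrr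
  set g := pvCell p sc r (W - 1) + sc r (W - 1) with hg
  have hdir : (if g > max d rr then
        (PySem.Dict.mk (pvBtItems p sc W r)).insert (1 + (r : Int)) "diag"
      else if rr > d then
        (PySem.Dict.mk (pvBtItems p sc W r)).insert (1 + (r : Int)) "right"
      else
        (PySem.Dict.mk (pvBtItems p sc W r)).insert (1 + (r : Int)) "down")
      = (PySem.Dict.mk (pvBtItems p sc W r)).insert (1 + (r : Int)) (pvDir d rr g) := by
    unfold pvDir
    split_ifs <;> rfl
  rw [hdir]
  exact pv_btDict_insert p sc W r

theorem pvB_eq (sm : List (String × List (String × Int))) (p : Int) (h1 h2 : String) :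
    middle_edge_half_matrix_alt sm p h1 h2 =
      (pvTbl p (pvSc sm h1.toList h2.toList) h1.toList.length h2.toList.length,
       pvBt p (pvSc sm h1.toList h2.toList) h1.toList.length h2.toList.length) := by
  rw [pvB_unfold]
  dsimp only
  rw [PySem.Str.len_eq, PySem.Str.len_eq]
  set V := h1.toList.length with hV
  set W := h2.toList.length with hWd
  set sc := pvSc sm h1.toList h2.toList with hsc
  congr 1
  · -- the matrix assembly
    rw [show ((V : Int) + 1) = ((V + 1 : Nat) : Int) by push_cast; ring]
    rw [PySem.List.pyRange_zero_nat, List.foldl_map]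
    rw [show ((W : Int) + 1) = ((W + 1 : Nat) : Int) by push_cast; ring]
    rw [PySem.List.pyRange_zero_nat]
    have hrows : ∀ (l : List Nat) (init : List (List Int)),
        l.foldl (fun rows (i : Nat) =>
          rows ++ [((List.range (W + 1)).map (fun (k : Nat) => ((k : Nat) : Int))).foldl
            (fun row j => row ++ [(pvCellsB sm p h1 h2).getD (((i : Nat) : Int), j) 0]) []]) init
          = init ++ l.map (fun (i : Nat) =>
              ((List.range (W + 1)).map (fun (k : Nat) => ((k : Nat) : Int))).foldl
                (fun row j => row ++ [(pvCellsB sm p h1 h2).getD (((i : Nat) : Int), j) 0]) []) := by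
      intro l
      induction l with
      | nil => intro init; simp
      | cons x xs ih => intro init; rw [List.foldl_cons, ih, List.map_cons]; simp
    rw [hrows, List.nil_append]
    unfold pvTbl
    apply pv_map_range_congr
    intro i hi
    rw [List.foldl_map]
    have hrow : ∀ (l : List Nat) (init : List Int),
        l.foldl (fun row (k : Nat) => row ++ [(pvCellsB sm p h1 h2).getD (((i : Nat) : Int), ((k : Nat) : Int)) 0]) init
          = init ++ l.map (fun (k : Nat) => (pvCellsB sm p h1 h2).getD (((i : Nat) : Int), ((k : Nat) : Int)) 0) := by
      intro l
      induction l with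
      | nil => intro init; simp
      | cons x xs ih => intro init; rw [List.foldl_cons, ih, List.map_cons]; simp
    rw [hrow, List.nil_append]
    unfold pvRow
    apply pv_map_range_congr
    intro j hj
    exact pvB_cells sm p h1 h2 i j (by omega) (by omega) _ _ rfl rfl
  · -- the backtrack pass
    by_cases hW0 : W = 0
    · rw [if_neg (by rw [hW0]; norm_num)]
      simp [pvBt, hW0]
    · rw [if_pos (by exact_mod_cast Nat.pos_of_ne_zero (by exact_mod_cast hW0))]
      rw [show ((V : Int) + 1) = ((V + 1 : Nat) : Int) by push_cast; ring]
      rw [PySem.List.pyRange_one]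
      rw [show ((((V + 1 : Nat)) : Int) - 1).toNat = V by omega]
      rw [List.foldl_map]
      have hbt0 : (PySem.Dict.mk [((0 : Int), "right")] : PySem.Dict Int String)
          = PySem.Dict.mk (pvBtItems p sc W 0) := by
        simp [pvBtItems]
      rw [hbt0]
      have hfold := pv_foldl_range_inv
        (fun bt (k : Nat) => pvStepBt2 sm p h1 h2 ((W : Int)) (pvCellsB sm p h1 h2) bt (1 + (k : Int)))
        (fun r => PySem.Dict.mk (pvBtItems p sc W r))
        V
        (fun r hr => pvB_bt_step sm p h1 h2 r hr hW0)
      rw [hfold]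
      rw [pvBt_eq_items p sc V W hW0]

-- ===== VERDICT (by name: the statement is the Claim_ definition above) =====
theorem middle_edge_half_matrix_spec : Claim_equal_middle_edge_half_matrix := by
  intro sm p h1 h2 _ _
  unfold Spec_middle_edge_half_matrix
  rw [pvA_eq, pvB_eq]
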